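-- pv_equiv track=rewrite | github.com/yutanakamura-tky/kart | src/modules/privacy/utils/attacker.py | get_stride_masked_sentences
-- ===== SOURCE A (Python) =====
-- def get_stride_masked_sentences(tokens_of_single_sentence):
--     results = [
--         [token for token in tokens_of_single_sentence]
--         for _ in range(len(tokens_of_single_sentence))
--     ]
--
--     for i in range(len(tokens_of_single_sentence)):
--         results[i][i] = "[MASK]"
--
--     return results
-- ===== SOURCE B (Python) =====
-- def get_stride_masked_sentences(tokens_of_single_sentence):
--     # Column-wise: column j of the result matrix is constant (tokens[j])
--     # except the diagonal entry, which is the mask; build the n columns as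
--     # constant runs around the mask, then transpose with zip to get the rows.
--     toks = list(tokens_of_single_sentence)
--     n = len(toks)
--     cols = [[tok] * j + ["[MASK]"] + [tok] * (n - 1 - j) for j, tok in enumerate(toks)]
--     return [list(row) for row in zip(*cols)]
-- ===== Notes on version B (the rewrite author's own statement) =====
-- stated objective: alternative
-- what changed: B builds the result column-wise - each column is a constant run of its own token around the diagonal mask (exploiting that column j is constant off the diagonal) - and then transposes with zip, instead of A's n full row copies followed by an in-place diagonal overwrite.
import Mathlib
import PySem

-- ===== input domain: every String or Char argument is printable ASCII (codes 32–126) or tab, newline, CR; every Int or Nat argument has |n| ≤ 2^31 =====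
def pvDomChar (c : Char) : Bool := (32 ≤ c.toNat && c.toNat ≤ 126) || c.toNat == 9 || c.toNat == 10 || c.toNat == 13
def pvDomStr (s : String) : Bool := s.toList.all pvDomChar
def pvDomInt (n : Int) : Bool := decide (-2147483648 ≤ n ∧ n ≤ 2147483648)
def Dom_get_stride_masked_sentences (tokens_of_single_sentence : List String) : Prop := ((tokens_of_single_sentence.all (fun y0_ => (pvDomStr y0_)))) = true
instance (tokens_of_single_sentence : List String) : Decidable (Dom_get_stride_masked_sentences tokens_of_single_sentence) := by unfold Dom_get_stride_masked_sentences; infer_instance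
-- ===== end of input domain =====

-- B builds the matrix column-wise — column j is a constant run of its own token around the
-- diagonal mask — and transposes with zip; A copies the whole row n times and overwrites the diagonal.

-- ===== PORT A =====
-- 'for i in range(len(...))' is ported over List.range (the indices 0..n-1, exact here);
-- 'results[i][i] = "[MASK]"' is rs.set i ((rs.getD i []).set i "[MASK]") — i is always in range, so getD/set are exact.
def get_stride_masked_sentences (tokens_of_single_sentence : List String) : List (List String) :=
  let results := (List.range tokens_of_single_sentence.length).map
    (fun _ => tokens_of_single_sentence.map (fun token => token))
  (List.range tokens_of_single_sentence.length).foldl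
    (fun rs i => rs.set i ((rs.getD i []).set i "[MASK]")) results

-- ===== PORT B =====
-- zip(*cols): repeatedly emit the heads and recurse on the tails, stopping as soon as any
-- iterator (column) is exhausted — exactly Python's zip; zip() of no iterables is empty.
def pvTranspose (cols : List (List String)) : List (List String) :=
  if h : cols ≠ [] ∧ ∀ c ∈ cols, c ≠ [] then
    cols.map (fun c => c.headD "") :: pvTranspose (cols.map (fun c => c.tail))
  else []
termination_by (cols.headD []).length
decreasing_by
  obtain ⟨hne, hall⟩ := h
  cases cols with
  | nil => exact absurd rfl hne
  | cons c rest =>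
    have hc : c ≠ [] := hall c (by simp)
    have : 0 < c.length := List.length_pos_iff.mpr hc
    simp [List.length_tail]
    omega

-- '[tok] * j' is List.replicate; the enumerate index j is a nonnegative Int, so j.toNat is exact;
-- 'list(row)' is the identity on the ported list representation, so pvTranspose's rows are returned as-is.
def get_stride_masked_sentences_alt (tokens_of_single_sentence : List String) : List (List String) :=
  let n := tokens_of_single_sentence.length
  let cols := (PySem.List.enumerate tokens_of_single_sentence).map
    (fun jt => List.replicate jt.1.toNat jt.2 ++ ["[MASK]"] ++ List.replicate (n - 1 - jt.1.toNat) jt.2)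
  pvTranspose cols

-- ===== PRECONDITION & SPEC =====
def Spec_get_stride_masked_sentences (tokens_of_single_sentence : List String) (out : List (List String)) : Prop := out = get_stride_masked_sentences_alt tokens_of_single_sentence
instance (tokens_of_single_sentence : List String) (out : List (List String)) : Decidable (Spec_get_stride_masked_sentences tokens_of_single_sentence out) := by unfold Spec_get_stride_masked_sentences; infer_instance

-- ===== CLAIM (what is proved, stated in full; the proofs are below) =====
def Claim_equal_get_stride_masked_sentences : Prop := ∀ (tokens_of_single_sentence : List String), Dom_get_stride_masked_sentences tokens_of_single_sentence → Spec_get_stride_masked_sentences tokens_of_single_sentence (get_stride_masked_sentences tokens_of_single_sentence)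

-- ===== LEMMAS AND PROOFS =====

-- A's diagonal-overwriting loop body, named so the lemmas below can speak about it.
def pvStep (rs : List (List String)) (i : Nat) : List (List String) :=
  rs.set i ((rs.getD i []).set i "[MASK]")

-- After folding A's loop over range k, row j is the initial row j with position j masked iff j < k.
theorem pvFoldl_range_get (k : Nat) (rs : List (List String)) (j : Nat) :
    ((List.range k).foldl pvStep rs)[j]? =
      if j < k then rs[j]?.map (fun r => r.set j "[MASK]") else rs[j]? := by
  induction k generalizing j with
  | zero => simp
  | succ k ih =>
    rw [List.range_succ, List.foldl_append]
    simp only [List.foldl_cons, List.foldl_nil]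
    by_cases hjk : j = k
    · subst hjk
      have hget : ((List.range j).foldl pvStep rs)[j]? = rs[j]? := by rw [ih]; simp
      simp [pvStep, List.getElem?_set_self', hget, List.getD_eq_getElem?_getD]
      cases h : rs[j]? <;> simp [Function.const]
    · rw [pvStep, List.getElem?_set_ne (Ne.symm hjk), ih]
      have hiff : j < k + 1 ↔ j < k := by omega
      simp only [hiff]

-- Row i of the transpose of a rectangular (all columns length n) nonempty-or-degenerate
-- family of columns is the list of the columns' i-th entries.
theorem pvTranspose_getElem? (i : Nat) (cols : List (List String)) (n : Nat)
    (hn : ∀ c ∈ cols, c.length = n) (hc : cols ≠ [] ∨ n = 0) :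
    (pvTranspose cols)[i]? =
      if i < n then some (cols.map (fun c => c.getD i "")) else none := by
  induction i generalizing cols n with
  | zero =>
    by_cases h0 : n = 0
    · subst h0
      rw [pvTranspose]
      have : ¬ (cols ≠ [] ∧ ∀ c ∈ cols, c ≠ []) := by
        rintro ⟨hne, hall⟩
        cases cols with
        | nil => exact hne rfl
        | cons c rest =>
          exact hall c (by simp) (List.eq_nil_of_length_eq_zero (hn c (by simp)))
      simp [this]
    · have hpos : 0 < n := Nat.pos_of_ne_zero h0
      have hne : cols ≠ [] := hc.resolve_right h0
      rw [pvTranspose]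
      have hcond : cols ≠ [] ∧ ∀ c ∈ cols, c ≠ [] := by
        refine ⟨hne, fun c hcmem => ?_⟩
        intro hnil
        rw [hnil] at hcmem
        have := hn [] hcmem
        simp at this
        omega
      simp only [dif_pos hcond, List.getElem?_cons_zero, if_pos hpos, Option.some.injEq]
      apply List.map_congr_left
      intro c hcmem
      have hlen : 0 < c.length := by rw [hn c hcmem]; exact hpos
      cases c with
      | nil => simp at hlen
      | cons x xs => simp [List.getD]
  | succ i ih =>
    by_cases h0 : n = 0
    · subst h0
      rw [pvTranspose]
      have : ¬ (cols ≠ [] ∧ ∀ c ∈ cols, c ≠ []) := by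
        rintro ⟨hne, hall⟩
        cases cols with
        | nil => exact hne rfl
        | cons c rest =>
          exact hall c (by simp) (List.eq_nil_of_length_eq_zero (hn c (by simp)))
      simp [this]
    · have hpos : 0 < n := Nat.pos_of_ne_zero h0
      have hne : cols ≠ [] := hc.resolve_right h0
      rw [pvTranspose]
      have hcond : cols ≠ [] ∧ ∀ c ∈ cols, c ≠ [] := by
        refine ⟨hne, fun c hcmem => ?_⟩
        intro hnil
        rw [hnil] at hcmem
        have := hn [] hcmem
        simp at this
        omega
      simp only [dif_pos hcond, List.getElem?_cons_succ]
      rw [ih (cols.map (fun c => c.tail)) (n - 1)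
        (by
          intro c hcmem
          obtain ⟨c', hc'mem, rfl⟩ := List.mem_map.mp hcmem
          rw [List.length_tail, hn c' hc'mem])
        (by left; simpa using hne)]
      have hiff : i < n - 1 ↔ i + 1 < n := by omega
      rw [List.map_map]
      by_cases hi : i + 1 < n
      · rw [if_pos (hiff.mpr hi), if_pos hi]
        congr 1
        apply List.map_congr_left
        intro c hcmem
        have hlen : 0 < c.length := by rw [hn c hcmem]; exact hpos
        cases c with
        | nil => simp at hlen
        | cons x xs => simp [List.getD]
      · rw [if_neg (fun h => hi (hiff.mp h)), if_neg hi]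

-- Entry i (i, k < n) of column k of B equals the mask on the diagonal and the column's token off it.
theorem pvCol_getD (tok : String) (k n i : Nat) (hk : k < n) (hi : i < n) :
    (List.replicate k tok ++ ["[MASK]"] ++ List.replicate (n - 1 - k) tok).getD i "" =
      if i = k then "[MASK]" else tok := by
  rcases lt_trichotomy i k with h | h | h
  · rw [if_neg (by omega)]
    rw [List.getD_eq_getElem?_getD, List.append_assoc,
      List.getElem?_append_left (by simpa using h)]
    simp [h]
  · subst h
    rw [if_pos rfl, List.getD_eq_getElem?_getD, List.append_assoc,
      List.getElem?_append_right (by simp)]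
    simp
  · rw [if_neg (by omega)]
    rw [List.getD_eq_getElem?_getD, List.append_assoc,
      List.getElem?_append_right (by simpa using Nat.le_of_lt h)]
    rw [List.length_replicate]
    have h1 : i - k = (i - k - 1) + 1 := by omega
    rw [h1, List.singleton_append, List.getElem?_cons_succ]
    simp [show i - k - 1 < n - 1 - k by omega]

-- ===== VERDICT (by name: the statement is the Claim_ definition above) =====
theorem get_stride_masked_sentences_spec : Claim_equal_get_stride_masked_sentences := by
  intro tokens _
  show get_stride_masked_sentences tokens = get_stride_masked_sentences_alt tokens
  unfold get_stride_masked_sentences get_stride_masked_sentences_alt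
  set n := tokens.length with hn
  set cols := (PySem.List.enumerate tokens).map
    (fun jt => List.replicate jt.1.toNat jt.2 ++ ["[MASK]"] ++ List.replicate (n - 1 - jt.1.toNat) jt.2)
    with hcols
  have hcollen : ∀ c ∈ cols, c.length = n := by
    intro c hcmem
    rw [hcols] at hcmem
    obtain ⟨jt, hjtmem, rfl⟩ := List.mem_map.mp hcmem
    obtain ⟨k, hk, rfl⟩ := (PySem.List.mem_enumerate_iff _ _ _).mp hjtmem
    simp only [List.length_append, List.length_replicate, List.length_cons, List.length_nil]
    have : ((0 : Int) + (k : Int)).toNat = k := by omega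
    rw [this]
    omega
  have hcne : cols ≠ [] ∨ n = 0 := by
    by_cases h : n = 0
    · right; exact h
    · left
      rw [hcols]
      simp only [ne_eq, List.map_eq_nil_iff]
      intro habs
      have := PySem.List.length_enumerate tokens 0
      rw [habs] at this
      simp at this
      omega
  apply List.ext_getElem?
  intro i
  rw [show (fun rs j => rs.set j ((List.getD rs j []).set j "[MASK]")) = pvStep from rfl,
    pvFoldl_range_get, pvTranspose_getElem? i cols n hcollen hcne]
  by_cases hi : i < n
  · rw [if_pos hi, if_pos hi, List.getElem?_map, List.getElem?_range hi]
    simp only [Option.map_some, Option.some.injEq, List.map_id']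
    rw [hcols, List.map_map]
    apply List.ext_getElem?
    intro k
    rw [List.getElem?_map, PySem.List.getElem?_enumerate]
    by_cases hk : k < n
    · rw [List.getElem?_eq_getElem (by omega : k < tokens.length)]
      simp only [Option.map_some, Function.comp]
      have htn : ((0 : Int) + (k : Int)).toNat = k := by omega
      rw [htn, pvCol_getD _ k n i hk hi]
      by_cases hik : i = k
      · subst hik
        rw [if_pos rfl, List.getElem?_set_self (by omega)]
      · rw [if_neg hik, List.getElem?_set_ne (by omega), List.getElem?_eq_getElem (by omega : k < tokens.length)]
    · rw [List.getElem?_eq_none (by omega : tokens.length ≤ k),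
        List.getElem?_eq_none (by rw [List.length_set]; omega)]
      simp
  · rw [if_neg hi, if_neg hi, List.getElem?_map, List.getElem?_eq_none (by rw [List.length_range]; omega)]
    simp
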